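-- pv_equiv track=rewrite | github.com/Sheriffy4/recon | pcap_to_json_analyzer.py | _split_csv_tokens
-- ===== SOURCE A (Python) =====
-- def _split_csv_tokens(values):
--     tokens = []
--     for v in values or []:
--         for part in str(v).split(","):
--             part = part.strip()
--             if part:
--                 tokens.append(part)
--     return tokens
-- ===== SOURCE B (Python) =====
-- def _split_csv_tokens(values):
--     s = ",".join(str(v) for v in (values or []))
--     return [p for p in (t.strip() for t in s.split(",")) if p]
-- ===== Notes on version B (the rewrite author's own statement) =====
-- stated objective: simpler
-- what changed: Replaces the nested per-value split/strip/append loops with a single comma-join of all values followed by one flat split, strip and filter pass.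
import Mathlib
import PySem

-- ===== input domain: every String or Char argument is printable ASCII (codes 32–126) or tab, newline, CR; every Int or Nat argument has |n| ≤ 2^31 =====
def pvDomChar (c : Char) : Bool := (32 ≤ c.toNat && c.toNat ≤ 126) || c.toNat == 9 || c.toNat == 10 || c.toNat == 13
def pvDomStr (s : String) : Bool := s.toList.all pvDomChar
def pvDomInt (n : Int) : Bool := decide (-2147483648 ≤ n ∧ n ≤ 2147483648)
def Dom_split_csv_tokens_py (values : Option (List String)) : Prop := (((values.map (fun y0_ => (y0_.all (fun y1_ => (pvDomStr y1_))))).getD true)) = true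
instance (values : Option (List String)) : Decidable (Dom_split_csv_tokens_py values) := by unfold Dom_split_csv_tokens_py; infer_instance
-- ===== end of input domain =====

-- B replaces the nested per-value split/strip/append loops by one comma-join of all
-- values followed by a single flat split/strip/filter pass (objective: simpler).

-- ===== PORT A =====
-- literal port of A: outer loop over `values or []`, inner loop over v.split(","),
-- strip each part, append the non-empty ones.  str(v) = v since v is a string.
-- v.split(",") is PySem.Str.split? v "," (some, since the separator "," is non-empty).
def split_csv_tokens_py (values : Option (List String)) : List String :=
  (values.getD []).foldl
    (fun tokens v =>
      ((PySem.Str.split? v ",").getD []).foldl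
        (fun tokens part =>
          let part := PySem.Str.strip part
          if part ≠ "" then tokens ++ [part] else tokens)
        tokens)
    []

-- ===== PORT B =====
-- literal port of B: s = ",".join(values or []); then one split/strip/filter pass.
def split_csv_tokens_py_alt (values : Option (List String)) : List String :=
  let s := PySem.Str.join "," (values.getD [])
  (((PySem.Str.split? s ",").getD []).map PySem.Str.strip).filter (fun p => p ≠ "")

-- ===== PRECONDITION & SPEC =====
def Spec_split_csv_tokens_py (values : Option (List String)) (out : List String) : Prop := out = split_csv_tokens_py_alt values
instance (values : Option (List String)) (out : List String) : Decidable (Spec_split_csv_tokens_py values out) := by unfold Spec_split_csv_tokens_py; infer_instance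

-- ===== CLAIM (what is proved, stated in full; the proofs are below) =====
def Claim_equal_split_csv_tokens_py : Prop := ∀ (values : Option (List String)), Dom_split_csv_tokens_py values → Spec_split_csv_tokens_py values (split_csv_tokens_py values)

-- ===== LEMMAS AND PROOFS =====

theorem pv_go_eq (c : Char) (fuel : Nat) (l cur : List Char)
    (acc2 : List (List Char)) (h : l.length < fuel) :
    PySem.Chars.splitOn.go [c] fuel l cur acc2 =
      acc2.reverse ++ (l.splitOnP (· == c)).modifyHead (cur.reverse ++ ·) := by
  induction fuel generalizing l cur acc2 with
  | zero => omega
  | succ fuel ih =>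
    cases l with
    | nil =>
      simp [PySem.Chars.splitOn.go, List.splitOnP_nil]
    | cons x rest =>
      rw [PySem.Chars.splitOn.go]
      simp only [List.length_cons] at h
      by_cases hx : x = c
      · subst hx
        have hpre : List.isPrefixOf [x] (x :: rest) = true := by
          simp [List.isPrefixOf]
        rw [if_pos hpre]
        simp only [List.length_cons, List.length_nil, List.drop_succ_cons, List.drop_zero]
        rw [ih rest [] (cur.reverse :: acc2) (by omega)]
        simp [List.splitOnP_cons]
        rw [show (fun x : List Char => x) = id from rfl, List.modifyHead_id]; rfl
      · have hpre : List.isPrefixOf [c] (x :: rest) = false := by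
          simp [List.isPrefixOf]; exact fun hc => (hx hc.symm).elim
        rw [if_neg (by simp [hpre])]
        rw [ih rest (x :: cur) acc2 (by omega)]
        rw [List.splitOnP_cons]
        have : (x == c) = false := by simp [hx]
        simp only [this, Bool.false_eq_true, if_false, List.modifyHead_modifyHead]
        simp [Function.comp_def, List.reverse_cons, List.append_assoc]

theorem pv_splitOn_eq (c : Char) (l : List Char) :
    PySem.Chars.splitOn l [c] = l.splitOnP (· == c) := by
  rw [PySem.Chars.splitOn, pv_go_eq c (l.length+1) l [] [] (by omega)]
  simp only [List.reverse_nil, List.nil_append]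
  rw [show (fun x : List Char => x) = id from rfl, List.modifyHead_id]; rfl

theorem pv_split_intercalate (c : Char) (vs : List (List Char)) (h : vs ≠ []) :
    ([c].intercalate vs).splitOnP (· == c) = vs.flatMap (fun v => v.splitOnP (· == c)) := by
  induction vs with
  | nil => exact absurd rfl h
  | cons a rest ih =>
    cases rest with
    | nil => simp [List.intercalate]
    | cons b t =>
      have : [c].intercalate (a :: b :: t) = a ++ c :: [c].intercalate (b :: t) := by
        simp [List.intercalate]
      rw [this, List.splitOnP_append_cons _ _ _ _ (by simp), ih (by simp)]
      simp

theorem pv_core (vs : List (List Char)) :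
    ((PySem.Chars.splitOn (PySem.Chars.join [','] vs) [',']).map PySem.Chars.strip).filter
        (fun p => p ≠ []) =
      vs.flatMap (fun v =>
        ((PySem.Chars.splitOn v [',']).map PySem.Chars.strip).filter (fun p => p ≠ [])) := by
  cases vs with
  | nil =>
    show _ = ([] : List (List Char))
    rw [PySem.Chars.join, pv_splitOn_eq]
    simp [List.intercalate, List.splitOnP_nil]
    rfl
  | cons a rest =>
    rw [PySem.Chars.join, pv_splitOn_eq, pv_split_intercalate ',' _ (by simp)]
    simp only [List.map_flatMap, List.filter_flatMap]
    congr 1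
    funext v
    rw [pv_splitOn_eq]

theorem pv_pass (s : String) :
    (((PySem.Str.split? s ",").getD []).map PySem.Str.strip).filter (fun p => p ≠ "") =
      (((PySem.Chars.splitOn s.toList [',']).map PySem.Chars.strip).filter
        (fun p => p ≠ [])).map String.ofList := by
  have h1 : PySem.Str.split? s "," = some ((PySem.Chars.splitOn s.toList [',']).map String.ofList) := by
    simp [PySem.Str.split?, PySem.Chars.split?, show ",".toList = [','] from rfl]
  have h2 : PySem.Str.strip ∘ String.ofList = String.ofList ∘ PySem.Chars.strip := by
    funext cs; simp [PySem.Str.strip]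
  rw [h1, Option.getD_some, List.map_map, h2, ← List.map_map, List.filter_map]
  refine congrArg (List.map String.ofList) ?_
  refine List.filter_congr ?_
  intro cs _
  simp only [Function.comp_apply]
  rw [decide_eq_decide]
  simp [String.ext_iff]

theorem pv_inner (parts : List String) (acc : List String) :
    parts.foldl
        (fun tokens part =>
          let part := PySem.Str.strip part
          if part ≠ "" then tokens ++ [part] else tokens) acc =
      acc ++ (parts.map PySem.Str.strip).filter (fun p => p ≠ "") := by
  induction parts generalizing acc with
  | nil => simp
  | cons p rest ih =>
    simp only [List.foldl_cons, List.map_cons, List.filter_cons]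
    by_cases hp : PySem.Str.strip p ≠ ""
    · rw [ih]; simp [hp]
    · rw [ih]; simp at hp; simp [hp]

theorem pv_A_eq (vs : List String) (acc : List String) :
    vs.foldl
        (fun tokens v =>
          ((PySem.Str.split? v ",").getD []).foldl
            (fun tokens part =>
              let part := PySem.Str.strip part
              if part ≠ "" then tokens ++ [part] else tokens) tokens) acc =
      acc ++ vs.flatMap (fun v =>
        (((PySem.Str.split? v ",").getD []).map PySem.Str.strip).filter (fun p => p ≠ "")) := by
  induction vs generalizing acc with
  | nil => simp
  | cons v rest ih =>
    simp only [List.foldl_cons, List.flatMap_cons]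
    rw [pv_inner, ih, List.append_assoc]

-- ===== VERDICT (by name: the statement is the Claim_ definition above) =====
theorem split_csv_tokens_py_spec : Claim_equal_split_csv_tokens_py := by
  intro values _
  unfold Spec_split_csv_tokens_py split_csv_tokens_py split_csv_tokens_py_alt
  rw [pv_A_eq, List.nil_append, pv_pass]
  have hj : (PySem.Str.join "," (values.getD [])).toList
      = PySem.Chars.join [','] ((values.getD []).map String.toList) := by
    simp [PySem.Str.join]
  rw [hj, pv_core]
  simp only [pv_pass]
  simp [List.map_flatMap, List.flatMap_map]
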